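-- pv_equiv track=rewrite | github.com/EthemKesim/Face-Recognation-Based-Tracking-System | web-dashboard/backend/data_access.py | collect_record_notes
-- ===== SOURCE A (Python) =====
-- from typing import Any
--
-- def collect_record_notes(events: list[dict[str, Any]], current_status: str) -> list[str]:
--     notes: list[str] = []
--     if current_status == "Still Inside":
--         notes.append("No check-out event recorded yet for this day.")
--     if any("WARNING: Late" in event["status"] for event in events):
--         notes.append("Includes a late warning event.")
--     if any("VIOLATION: Late" in event["status"] for event in events):
--         notes.append("Includes a late violation event.")
--     if any("Lunch Break" in event["status"] for event in events):
--         notes.append("Contains a lunch break state.")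
--     if any("OVERTIME" in event["status"] for event in events):
--         notes.append("Contains overtime.")
--     return notes
-- ===== SOURCE B (Python) =====
-- def collect_record_notes(events, current_status):
--     notes = []
--     if current_status == "Still Inside":
--         notes.append("No check-out event recorded yet for this day.")
--     warning = violation = lunch = overtime = False
--     for event in events:
--         s = event["status"]
--         warning = warning or "WARNING: Late" in s
--         violation = violation or "VIOLATION: Late" in s
--         lunch = lunch or "Lunch Break" in s
--         overtime = overtime or "OVERTIME" in s
--     if warning:
--         notes.append("Includes a late warning event.")
--     if violation:
--         notes.append("Includes a late violation event.")
--     if lunch: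
--         notes.append("Contains a lunch break state.")
--     if overtime:
--         notes.append("Contains overtime.")
--     return notes
-- ===== Notes on version B (the rewrite author's own statement) =====
-- stated objective: simpler
-- what changed: A makes four separate any() scans over the event list (plus generator machinery each time); B makes a single pass maintaining four boolean flags and appends the notes from the flags afterwards.
import Mathlib
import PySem

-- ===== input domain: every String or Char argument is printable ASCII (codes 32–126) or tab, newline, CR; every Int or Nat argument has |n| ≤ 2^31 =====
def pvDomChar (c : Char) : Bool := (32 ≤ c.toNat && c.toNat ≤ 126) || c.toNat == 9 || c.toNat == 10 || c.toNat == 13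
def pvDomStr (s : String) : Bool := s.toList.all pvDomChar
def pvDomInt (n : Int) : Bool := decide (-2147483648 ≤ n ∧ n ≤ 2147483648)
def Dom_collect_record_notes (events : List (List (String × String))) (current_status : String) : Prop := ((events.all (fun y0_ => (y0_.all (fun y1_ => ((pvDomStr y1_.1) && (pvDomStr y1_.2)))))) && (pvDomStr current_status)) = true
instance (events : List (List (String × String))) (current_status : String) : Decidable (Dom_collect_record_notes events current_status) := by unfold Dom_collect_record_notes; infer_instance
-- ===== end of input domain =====

-- B replaces A's four separate any()-scans over the events by a single pass maintaining four boolean flags (simpler: one traversal).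


-- event["status"]: first-match association-list lookup (Python dict); Pre_ guarantees the key is present, so getD "" is never hit inside Pre_
def pvStatus (ev : List (String × String)) : String :=
  (((ev.find? (fun p => p.1 == "status")).map (fun p => p.2)).getD "")

-- ===== PORT A =====
def collect_record_notes (events : List (List (String × String))) (current_status : String) : List String :=
  let notes : List String := []
  let notes := if current_status == "Still Inside" then notes ++ ["No check-out event recorded yet for this day."] else notes
  let notes := if events.any (fun ev => PySem.Str.isIn "WARNING: Late" (pvStatus ev)) then notes ++ ["Includes a late warning event."] else notes
  let notes := if events.any (fun ev => PySem.Str.isIn "VIOLATION: Late" (pvStatus ev)) then notes ++ ["Includes a late violation event."] else notes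
  let notes := if events.any (fun ev => PySem.Str.isIn "Lunch Break" (pvStatus ev)) then notes ++ ["Contains a lunch break state."] else notes
  let notes := if events.any (fun ev => PySem.Str.isIn "OVERTIME" (pvStatus ev)) then notes ++ ["Contains overtime."] else notes
  notes

-- ===== PORT B =====
def collect_record_notes_alt (events : List (List (String × String))) (current_status : String) : List String :=
  let notes : List String := if current_status == "Still Inside" then ["No check-out event recorded yet for this day."] else []
  let flags : Bool × Bool × Bool × Bool :=
    events.foldl (fun f ev =>
      let s := pvStatus ev
      (f.1 || PySem.Str.isIn "WARNING: Late" s,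
       f.2.1 || PySem.Str.isIn "VIOLATION: Late" s,
       f.2.2.1 || PySem.Str.isIn "Lunch Break" s,
       f.2.2.2 || PySem.Str.isIn "OVERTIME" s)) (false, false, false, false)
  let notes := if flags.1 then notes ++ ["Includes a late warning event."] else notes
  let notes := if flags.2.1 then notes ++ ["Includes a late violation event."] else notes
  let notes := if flags.2.2.1 then notes ++ ["Contains a lunch break state."] else notes
  let notes := if flags.2.2.2 then notes ++ ["Contains overtime."] else notes
  notes

-- ===== PRECONDITION & SPEC =====
-- Pre_ requires every event to carry the key "status" (Python raises KeyError on a keyless event it scans;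
-- this slightly narrows A's domain: A can still return when every any() short-circuits before a keyless event — see claim cites).
def Pre_collect_record_notes (events : List (List (String × String))) (current_status : String) : Prop :=
  events.all (fun ev => ev.any (fun p => p.1 == "status")) = true
instance (events : List (List (String × String))) (current_status : String) : Decidable (Pre_collect_record_notes events current_status) := by unfold Pre_collect_record_notes; infer_instance

def pvWitness_collect_record_notes : (List (List (String × String))) × String :=
  ([[("status", "WARNING: Late arrival")], [("status", "Lunch Break")]], "Still Inside")

def Spec_collect_record_notes (events : List (List (String × String))) (current_status : String) (out : List String) : Prop := out = collect_record_notes_alt events current_status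
instance (events : List (List (String × String))) (current_status : String) (out : List String) : Decidable (Spec_collect_record_notes events current_status out) := by unfold Spec_collect_record_notes; infer_instance

-- ===== CLAIM (what is proved, stated in full; the proofs are below) =====
def Claim_equal_collect_record_notes : Prop := ∀ (events : List (List (String × String))) (current_status : String), Dom_collect_record_notes events current_status → Pre_collect_record_notes events current_status → Spec_collect_record_notes events current_status (collect_record_notes events current_status)

-- ===== LEMMAS AND PROOFS =====

-- the single pass over the events computes exactly the four any()-scans
theorem pv_flags_fold (events : List (List (String × String))) (a b c d : Bool) :
    events.foldl (fun f ev =>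
      let s := pvStatus ev
      (f.1 || PySem.Str.isIn "WARNING: Late" s,
       f.2.1 || PySem.Str.isIn "VIOLATION: Late" s,
       f.2.2.1 || PySem.Str.isIn "Lunch Break" s,
       f.2.2.2 || PySem.Str.isIn "OVERTIME" s)) (a, b, c, d)
    = (a || events.any (fun ev => PySem.Str.isIn "WARNING: Late" (pvStatus ev)),
       b || events.any (fun ev => PySem.Str.isIn "VIOLATION: Late" (pvStatus ev)),
       c || events.any (fun ev => PySem.Str.isIn "Lunch Break" (pvStatus ev)),
       d || events.any (fun ev => PySem.Str.isIn "OVERTIME" (pvStatus ev))) := by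
  induction events generalizing a b c d with
  | nil => simp
  | cons e t ih => simp only [List.foldl_cons, List.any_cons, ih, Bool.or_assoc]

-- ===== VERDICT (by name: the statement is the Claim_ definition above) =====
theorem collect_record_notes_spec : Claim_equal_collect_record_notes := by
  intro events current_status _ _
  unfold Spec_collect_record_notes collect_record_notes collect_record_notes_alt
  rw [pv_flags_fold]
  simp
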